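-- pv_equiv track=rewrite | github.com/claudioDema99/SensorFusion_and_ML_NeuroProsthesisControl | prova_for_plotting_after_online.py | group_same_movement_type
-- ===== SOURCE A (Python) =====
-- def group_same_movement_type(movements):
--     type1 = []
--     type2 = []
--     type3 = []
--     type4 = []
--     j = 0
--     for i in range(1, len(movements)+1):
--         if i == 1+j:
--             type1.append(movements[i-1])
--         elif i == 2+j:
--             type2.append(movements[i-1])
--         elif i == 3+j:
--             type3.append(movements[i-1])
--         elif i == 4+j:
--             type4.append(movements[i-1])
--             j += 4
--     return type1, type2, type3, type4
-- ===== SOURCE B (Python) =====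
-- def group_same_movement_type(movements):
--     # idiomatic: strided slices handle the index-mod-4 distribution, no explicit loop
--     return movements[0::4], movements[1::4], movements[2::4], movements[3::4]
-- ===== Notes on version B (the rewrite author's own statement) =====
-- stated objective: idiomatic
-- what changed: Replaced the indexed for-loop with a manual chunk counter j and a four-way if/elif chain by four strided slices movements[r::4], r=0..3, which distribute elements by index mod 4 with no explicit loop or counter.
import Mathlib
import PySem

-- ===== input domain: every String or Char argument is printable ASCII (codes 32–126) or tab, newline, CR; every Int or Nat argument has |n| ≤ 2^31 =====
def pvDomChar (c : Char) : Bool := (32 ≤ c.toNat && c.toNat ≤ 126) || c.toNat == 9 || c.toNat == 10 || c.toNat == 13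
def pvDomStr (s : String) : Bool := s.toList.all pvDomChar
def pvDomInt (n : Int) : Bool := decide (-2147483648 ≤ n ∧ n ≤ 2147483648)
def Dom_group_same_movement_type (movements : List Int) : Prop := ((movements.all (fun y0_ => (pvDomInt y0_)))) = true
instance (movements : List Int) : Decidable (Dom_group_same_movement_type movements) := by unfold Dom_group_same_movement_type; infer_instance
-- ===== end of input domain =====

-- B replaces A's indexed loop with a manual chunk counter by four strided slices movements[r::4] (idiomatic).

-- ===== PORT A =====
-- loop body of A's for-loop (state: type1, type2, type3, type4, j; i is the loop variable)
def stepA (movements : List Int)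
    (acc : List Int × List Int × List Int × List Int × Int) (i : Int) :
    List Int × List Int × List Int × List Int × Int :=
  match acc with
  | (t1, t2, t3, t4, j) =>
    if i = 1 + j then (t1 ++ [PySem.List.pyGetD movements (i-1) 0], t2, t3, t4, j)
    else if i = 2 + j then (t1, t2 ++ [PySem.List.pyGetD movements (i-1) 0], t3, t4, j)
    else if i = 3 + j then (t1, t2, t3 ++ [PySem.List.pyGetD movements (i-1) 0], t4, j)
    else if i = 4 + j then (t1, t2, t3, t4 ++ [PySem.List.pyGetD movements (i-1) 0], j + 4)
    else (t1, t2, t3, t4, j)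
-- movements[i-1]: the loop index keeps i-1 in range, so pyGetD (default never used) is exact here
def group_same_movement_type (movements : List Int) : List Int × List Int × List Int × List Int :=
  let st := (PySem.List.pyRange 1 ((movements.length : Int) + 1) 1).foldl (stepA movements)
    ([], [], [], [], (0 : Int))
  (st.1, st.2.1, st.2.2.1, st.2.2.2.1)

-- ===== PORT B =====
-- movements[r::4]; the step is 4 ≠ 0, so slice? always returns some — .getD [] only discharges the Option
def group_same_movement_type_alt (movements : List Int) : List Int × List Int × List Int × List Int :=
  ((PySem.List.slice? movements (some 0) none 4).getD [],
   (PySem.List.slice? movements (some 1) none 4).getD [],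
   (PySem.List.slice? movements (some 2) none 4).getD [],
   (PySem.List.slice? movements (some 3) none 4).getD [])

-- ===== PRECONDITION & SPEC =====
def Spec_group_same_movement_type (movements : List Int) (out : List Int × List Int × List Int × List Int) : Prop := out = group_same_movement_type_alt movements
instance (movements : List Int) (out : List Int × List Int × List Int × List Int) : Decidable (Spec_group_same_movement_type movements out) := by unfold Spec_group_same_movement_type; infer_instance

-- ===== CLAIM (what is proved, stated in full; the proofs are below) =====
def Claim_equal_group_same_movement_type : Prop := ∀ (movements : List Int), Dom_group_same_movement_type movements → Spec_group_same_movement_type movements (group_same_movement_type movements)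

-- ===== LEMMAS AND PROOFS =====

-- every fourth element, starting with the head
def every4 : List Int → List Int
  | [] => []
  | x :: t => x :: every4 (t.drop 3)
termination_by xs => xs.length

theorem every4_append_singleton (ys : List Int) (x : Int) :
    every4 (ys ++ [x]) = if ys.length % 4 = 0 then every4 ys ++ [x] else every4 ys := by
  induction ys using every4.induct with
  | case1 => simp [every4]
  | case2 y t ih =>
    by_cases h3 : 3 ≤ t.length
    · have hd : (t ++ [x]).drop 3 = t.drop 3 ++ [x] := by
        rw [List.drop_append_of_le_length h3]
      simp only [List.cons_append, every4, hd, ih, List.length_drop, List.length_cons]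
      have : (t.length - 3) % 4 = (t.length + 1) % 4 := by omega
      rw [this]
      split_ifs <;> rfl
    · have hd : (t ++ [x]).drop 3 = [] := by
        have : (t ++ [x]).length ≤ 3 := by simp; omega
        exact List.drop_eq_nil_of_le this
      have hd2 : t.drop 3 = [] := List.drop_eq_nil_of_le (by omega)
      have hne : (y :: t).length % 4 ≠ 0 := by simp; omega
      simp only [List.cons_append, every4, hd, hd2, if_neg hne]

theorem filterMap_range_every4 (ys : List Int) :
    (List.range ((ys.length + 3) / 4)).filterMap (fun k => ys[4 * k]?) = every4 ys := by
  induction ys using every4.induct with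
  | case1 => simp [every4]
  | case2 y t ih =>
    have hcnt : ((y :: t).length + 3) / 4 = ((t.drop 3).length + 3) / 4 + 1 := by
      simp; omega
    rw [hcnt, List.range_succ_eq_map]
    simp only [List.filterMap_cons, List.filterMap_map]
    have h0 : (y :: t)[4 * 0]? = some y := by simp
    rw [h0]
    have hfun : ∀ k : ℕ, ((fun k => (y :: t)[4 * k]?) ∘ (fun i => i + 1)) k
        = (t.drop 3)[4 * k]? := by
      intro k
      simp only [Function.comp_apply]
      have : 4 * (k + 1) = (4 * k + 3) + 1 := by ring
      rw [this]
      simp [List.getElem?_drop]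
      congr 1
      omega
    rw [List.filterMap_congr (fun k _ => hfun k), ih]
    simp [every4]

theorem sliceB (xs : List Int) (r : ℕ) (hr : r < 4) :
    (PySem.List.slice? xs (some (r : Int)) none 4).getD [] = every4 (xs.drop r) := by
  have hr0 : ¬ ((r : Int) < 0) := by omega
  simp only [PySem.List.slice?, PySem.List.sliceIndices]
  norm_num
  simp only [if_neg hr0]
  by_cases hlen : xs.length ≤ r
  · have h1 : min (r : Int) (xs.length : Int) = (xs.length : Int) := by omega
    rw [h1]
    simp [List.drop_eq_nil_of_le hlen, every4]
  · have hlen' : r < xs.length := by omega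
    have h1 : min (r : Int) (xs.length : Int) = (r : Int) := by omega
    rw [h1]
    have hlt : (r : Int) < (xs.length : Int) := by exact_mod_cast hlen'
    rw [if_pos hlt]
    have hcnt : (((xs.length : Int) - (r : Int) + 4 - 1) / 4).toNat = ((xs.drop r).length + 3) / 4 := by
      simp only [List.length_drop]
      omega
    rw [hcnt]
    rw [← filterMap_range_every4 (xs.drop r)]
    apply List.filterMap_congr
    intro k _
    have h4 : ((r : Int) + 4 * (k : Int)).toNat = r + 4 * k := by omega
    rw [h4, List.getElem?_drop]

theorem drop_take_succ4 (xs : List Int) (n r : ℕ) (h : n < xs.length) :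
    (xs.take (n+1)).drop r =
      if r ≤ n then (xs.take n).drop r ++ [xs[n]] else (xs.take n).drop r := by
  have htake : xs.take (n+1) = xs.take n ++ [xs[n]] := by
    rw [List.take_add_one, List.getElem?_eq_getElem h]
    rfl
  rw [htake, List.drop_append]
  have hlen : (xs.take n).length = n := by simp; omega
  by_cases hrn : r ≤ n
  · rw [if_pos hrn, hlen]
    have h0 : r - n = 0 := by omega
    rw [h0, List.drop_zero]
  · rw [if_neg hrn, hlen]
    have h1 : (xs.take n).drop r = [] := List.drop_eq_nil_of_le (by omega)
    have h2 : ([xs[n]] : List Int).drop (r - n) = [] := List.drop_eq_nil_of_le (by simp; omega)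
    rw [h1, h2, List.nil_append]

theorem every4_take_succ (xs : List Int) (n r : ℕ) (h : n < xs.length) (hr : r < 4) :
    every4 ((xs.take (n+1)).drop r) =
      if n % 4 = r then every4 ((xs.take n).drop r) ++ [xs[n]]
      else every4 ((xs.take n).drop r) := by
  rw [drop_take_succ4 xs n r h]
  by_cases hrn : r ≤ n
  · rw [if_pos hrn, every4_append_singleton]
    have hlen : ((xs.take n).drop r).length = n - r := by simp; omega
    rw [hlen]
    by_cases hm : n % 4 = r
    · rw [if_pos (by omega), if_pos hm]
    · rw [if_neg (by omega), if_neg hm]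
  · rw [if_neg hrn]
    have hm : ¬ (n % 4 = r) := by omega
    rw [if_neg hm]

-- loop invariant for A: after processing i = 1..n, the four lists are the mod-4 groups
-- of the first n elements and j = 4*(n/4)
theorem loopA (xs : List Int) (n : ℕ) (h : n ≤ xs.length) :
    (PySem.List.pyRange 1 ((n : Int) + 1) 1).foldl (stepA xs) ([], [], [], [], (0 : Int)) =
      (every4 (xs.take n), every4 ((xs.take n).drop 1),
       every4 ((xs.take n).drop 2), every4 ((xs.take n).drop 3),
       ((4 * (n / 4) : ℕ) : Int)) := by
  induction n with
  | zero =>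
    rw [PySem.List.pyRange_one_eq_nil (by norm_num)]
    simp [every4]
  | succ m ih =>
    have hm : m < xs.length := by omega
    have hsplit : PySem.List.pyRange 1 ((↑(m+1) : Int) + 1) 1
        = PySem.List.pyRange 1 ((m : Int) + 1) 1 ++ [((m : Int) + 1)] := by
      push_cast
      exact PySem.List.pyRange_one_succ_right (by omega)
    rw [hsplit, List.foldl_append, ih (by omega)]
    simp only [List.foldl_cons, List.foldl_nil, stepA]
    have hget : PySem.List.pyGetD xs ((m : Int) + 1 - 1) 0 = xs[m] := by
      have : ((m : Int) + 1 - 1) = ((m : ℕ) : Int) := by omega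
      rw [this, PySem.List.pyGetD_natCast]
      simp [List.getD_eq_getElem?_getD, List.getElem?_eq_getElem hm]
    rw [hget]
    have e0 : every4 (xs.take (m+1)) =
        if m % 4 = 0 then every4 (xs.take m) ++ [xs[m]] else every4 (xs.take m) := by
      simpa using every4_take_succ xs m 0 hm (by omega)
    have e1 := every4_take_succ xs m 1 hm (by omega)
    have e2 := every4_take_succ xs m 2 hm (by omega)
    have e3 := every4_take_succ xs m 3 hm (by omega)
    have hcase : m % 4 = 0 ∨ m % 4 = 1 ∨ m % 4 = 2 ∨ m % 4 = 3 := by omega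
    rcases hcase with hc | hc | hc | hc
    · rw [if_pos (by push_cast; omega)]
      rw [e0, e1, e2, e3, if_pos hc, if_neg (by omega), if_neg (by omega), if_neg (by omega)]
      have : 4 * ((m+1) / 4) = 4 * (m / 4) := by omega
      rw [this]
    · rw [if_neg (by push_cast; omega), if_pos (by push_cast; omega)]
      rw [e0, e1, e2, e3, if_neg (by omega), if_pos hc, if_neg (by omega), if_neg (by omega)]
      have : 4 * ((m+1) / 4) = 4 * (m / 4) := by omega
      rw [this]
    · rw [if_neg (by push_cast; omega), if_neg (by push_cast; omega),
        if_pos (by push_cast; omega)]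
      rw [e0, e1, e2, e3, if_neg (by omega), if_neg (by omega), if_pos hc, if_neg (by omega)]
      have : 4 * ((m+1) / 4) = 4 * (m / 4) := by omega
      rw [this]
    · rw [if_neg (by push_cast; omega), if_neg (by push_cast; omega),
        if_neg (by push_cast; omega), if_pos (by push_cast; omega)]
      rw [e0, e1, e2, e3, if_neg (by omega), if_neg (by omega), if_neg (by omega), if_pos hc]
      have : ((4 * (m / 4) : ℕ) : Int) + 4 = ((4 * ((m+1) / 4) : ℕ) : Int) := by
        push_cast; omega
      rw [this]

-- ===== VERDICT (by name: the statement is the Claim_ definition above) =====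
theorem group_same_movement_type_spec : Claim_equal_group_same_movement_type := by
  intro movements _
  unfold Spec_group_same_movement_type group_same_movement_type group_same_movement_type_alt
  rw [loopA movements movements.length le_rfl]
  have s0 := sliceB movements 0 (by norm_num)
  have s1 := sliceB movements 1 (by norm_num)
  have s2 := sliceB movements 2 (by norm_num)
  have s3 := sliceB movements 3 (by norm_num)
  push_cast at s0 s1 s2 s3
  rw [s0, s1, s2, s3]
  simp
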